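-- pv_equiv track=rewrite | github.com/hepqis-uiuc/ymcirc | gray_ordered_histogram.py | bitstring_sans_ancilla_func
-- ===== SOURCE A (Python) =====
-- def bitstring_sans_ancilla_func(data):
--     bitstring_sans_ancilla = {}
--
--     for bitstring,hits in data.items():
--         bitstring = bitstring[:-3]
--         if bitstring in bitstring_sans_ancilla.keys():
--             bitstring_sans_ancilla[bitstring] += hits
--         else:
--             bitstring_sans_ancilla[bitstring] = hits
--
--     return bitstring_sans_ancilla
-- ===== SOURCE B (Python) =====
-- def bitstring_sans_ancilla_func(data):
--     # Staged nested scans: truncate once, list distinct keys in first-occurrence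
--     # order, then for each key sum its hits with a full scan over the pairs.
--     pairs = [(bs[:-3], hits) for bs, hits in data.items()]
--     keys = list(dict.fromkeys(k for k, _ in pairs))
--     return {k: sum(h for k2, h in pairs if k2 == k) for k in keys}
-- ===== Notes on version B (the rewrite author's own statement) =====
-- stated objective: alternative
-- what changed: Replaces the single-pass hash accumulation with staged passes: truncate all keys, extract the distinct keys in first-occurrence order, then compute each key's total by a separate filtering scan over all pairs (O(n*k) nested scans, no running dictionary of counts).
import Mathlib
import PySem

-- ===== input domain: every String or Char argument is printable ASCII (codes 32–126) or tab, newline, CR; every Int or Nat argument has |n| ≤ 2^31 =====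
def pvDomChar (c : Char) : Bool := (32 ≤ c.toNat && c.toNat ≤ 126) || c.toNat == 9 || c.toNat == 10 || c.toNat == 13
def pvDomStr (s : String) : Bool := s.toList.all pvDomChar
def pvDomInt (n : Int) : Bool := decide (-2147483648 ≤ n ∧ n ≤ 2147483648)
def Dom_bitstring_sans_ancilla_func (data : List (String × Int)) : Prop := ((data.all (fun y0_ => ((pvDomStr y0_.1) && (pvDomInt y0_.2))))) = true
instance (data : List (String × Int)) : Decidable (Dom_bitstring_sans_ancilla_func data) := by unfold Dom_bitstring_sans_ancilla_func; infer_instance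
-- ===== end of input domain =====

-- B replaces A's single-pass hash accumulation with staged passes (truncate, distinct keys, per-key filtering scan); same results, different structure.


-- bitstring[:-3], shared primitive step of both Pythons
def pvTrunc (s : String) : String := String.ofList (PySem.List.slice s.toList none (some (-3)))

-- ===== PORT A =====
def bitstring_sans_ancilla_func (data : List (String × Int)) : List (String × Int) :=
  (data.foldl
    (fun d p =>
      let bitstring := pvTrunc p.1
      if d.contains bitstring then d.modify bitstring 0 (· + p.2)
      else d.insert bitstring p.2)
    (PySem.Dict.empty : PySem.Dict String Int)).items

-- ===== PORT B =====
def bitstring_sans_ancilla_func_alt (data : List (String × Int)) : List (String × Int) :=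
  let pairs := data.map (fun p => (pvTrunc p.1, p.2))
  let keys := PySem.List.dedup (pairs.map (fun p => p.1))   -- list(dict.fromkeys(...))
  keys.map (fun k => (k, ((pairs.filter (fun p => p.1 == k)).map (fun p => p.2)).sum))

-- ===== PRECONDITION & SPEC =====
def Spec_bitstring_sans_ancilla_func (data : List (String × Int)) (out : List (String × Int)) : Prop := out = bitstring_sans_ancilla_func_alt data
instance (data : List (String × Int)) (out : List (String × Int)) : Decidable (Spec_bitstring_sans_ancilla_func data out) := by unfold Spec_bitstring_sans_ancilla_func; infer_instance

-- ===== CLAIM (what is proved, stated in full; the proofs are below) =====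
def Claim_equal_bitstring_sans_ancilla_func : Prop := ∀ (data : List (String × Int)), Dom_bitstring_sans_ancilla_func data → Spec_bitstring_sans_ancilla_func data (bitstring_sans_ancilla_func data)

-- ===== LEMMAS AND PROOFS =====

-- total hits of key k among the (already truncated) pairs l
def pvSumOf (l : List (String × Int)) (k : String) : Int :=
  ((l.filter (fun p => p.1 == k)).map (fun p => p.2)).sum

-- the dictionary A's loop has built after processing the truncated pairs l
def pvState (l : List (String × Int)) : PySem.Dict String Int :=
  PySem.Dict.mk ((PySem.List.dedup (l.map (fun p => p.1))).map (fun k => (k, pvSumOf l k)))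

theorem pvState_contains (l : List (String × Int)) (k : String) :
    (pvState l).contains k = ((l.map (fun p => p.1)).contains k) := by
  simp only [pvState, PySem.Dict.contains, List.any_map]
  rw [Bool.eq_iff_iff]
  simp only [List.any_eq_true, Function.comp, List.contains_eq_mem, decide_eq_true_eq,
    PySem.List.mem_dedup, beq_iff_eq]
  constructor
  · rintro ⟨x, hx, rfl⟩; exact hx
  · intro hk; exact ⟨k, hk, rfl⟩

theorem pvSumOf_append (l : List (String × Int)) (p : String × Int) (k : String) :
    pvSumOf (l ++ [p]) k = pvSumOf l k + (if p.1 == k then p.2 else 0) := by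
  simp only [pvSumOf, List.filter_append, List.map_append, List.sum_append]
  by_cases h : (p.1 == k) = true <;> simp [List.filter, h]

theorem pvSumOf_not_mem (l : List (String × Int)) (k : String)
    (h : k ∉ l.map (fun p => p.1)) : pvSumOf l k = 0 := by
  have hf : l.filter (fun p => p.1 == k) = [] := by
    rw [List.filter_eq_nil_iff]
    intro p hp hb
    exact h (List.mem_map.2 ⟨p, hp, by simpa using hb⟩)
  simp [pvSumOf, hf]

theorem pvState_getD (l : List (String × Int)) (k : String) :
    (pvState l).getD k 0 = pvSumOf l k := by
  simp only [pvState, PySem.Dict.getD, PySem.Dict.get?, List.find?_map]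
  cases h : List.find? ((fun q => q.1 == k) ∘ (fun x => (x, pvSumOf l x)))
      (PySem.List.dedup (l.map (fun p => p.1))) with
  | none =>
      have hk : k ∉ l.map (fun p => p.1) := by
        intro hm
        have := List.find?_eq_none.1 h k ((PySem.List.mem_dedup _ _).2 hm)
        simp [Function.comp] at this
      simp [pvSumOf_not_mem l k hk]
  | some x =>
      have hx := List.find?_some h
      simp only [Function.comp_apply, beq_iff_eq] at hx
      subst hx
      simp

theorem pvDedup_append_mem {x : String} {xs : List String} (h : x ∈ xs) :
    PySem.List.dedup (xs ++ [x]) = PySem.List.dedup xs := by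
  simp only [PySem.List.dedup, PySem.Set.ofList_eq_foldl, List.foldl_append, List.foldl_cons,
    List.foldl_nil]
  rw [PySem.Set.add, if_pos]
  rw [PySem.Set.contains, List.contains_eq_mem, decide_eq_true_eq]
  rw [← PySem.Set.ofList_eq_foldl]
  exact (PySem.Set.mem_ofList xs x).2 h

theorem pvDedup_append_not_mem {x : String} {xs : List String} (h : x ∉ xs) :
    PySem.List.dedup (xs ++ [x]) = PySem.List.dedup xs ++ [x] := by
  simp only [PySem.List.dedup, PySem.Set.ofList_eq_foldl, List.foldl_append, List.foldl_cons,
    List.foldl_nil]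
  rw [PySem.Set.add, if_neg]
  rw [PySem.Set.contains, List.contains_eq_mem, decide_eq_true_eq]
  rw [← PySem.Set.ofList_eq_foldl]
  exact fun hm => h ((PySem.Set.mem_ofList xs x).1 hm)

theorem pvStep (l : List (String × Int)) (p : String × Int) :
    (if (pvState l).contains p.1 then (pvState l).modify p.1 0 (· + p.2)
     else (pvState l).insert p.1 p.2) = pvState (l ++ [p]) := by
  rw [pvState_contains]
  by_cases hm : p.1 ∈ l.map (fun q => q.1)
  · rw [if_pos (by simpa using hm)]
    rw [PySem.Dict.modify, pvState_getD]
    apply PySem.Dict.ext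
    rw [PySem.Dict.insert, if_pos (by rw [pvState_contains]; simpa using hm)]
    show (List.map _ (pvState l).items) = _
    simp only [pvState, List.map_append, List.map_map, List.map_cons, List.map_nil]
    rw [pvDedup_append_mem hm]
    refine List.map_congr_left (fun k hk => ?_)
    simp only [Function.comp_apply]
    rw [pvSumOf_append]
    by_cases hkp : (p.1 == k) = true
    · have hpe : p.1 = k := by simpa using hkp
      subst hpe
      simp
    · have hne : (k == p.1) = false := by
        rw [beq_eq_false_iff_ne]
        intro hkeq
        exact absurd (by simp [hkeq] : (p.1 == k) = true) (by simp [hkp])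
      simp [hne, hkp]
  · rw [if_neg (by simpa using hm)]
    apply PySem.Dict.ext
    rw [PySem.Dict.insert, if_neg (by rw [pvState_contains]; simpa using hm)]
    show (pvState l).items ++ [(p.1, p.2)] = _
    simp only [pvState, List.map_append, List.map_cons, List.map_nil]
    rw [pvDedup_append_not_mem hm, List.map_append, List.map_cons, List.map_nil]
    congr 1
    · refine List.map_congr_left (fun k hk => ?_)
      have hkm : k ∈ l.map (fun q => q.1) := (PySem.List.mem_dedup _ _).1 hk
      have hne : (p.1 == k) = false := by
        rw [beq_eq_false_iff_ne]
        intro he; exact hm (he ▸ hkm)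
      rw [pvSumOf_append, hne]
      simp
    · rw [pvSumOf_append]
      simp [pvSumOf_not_mem l p.1 hm]

theorem pvLoop (rest l : List (String × Int)) :
    rest.foldl
      (fun d p =>
        if d.contains p.1 then d.modify p.1 0 (· + p.2)
        else d.insert p.1 p.2)
      (pvState l)
      = pvState (l ++ rest) := by
  induction rest generalizing l with
  | nil => simp
  | cons q t ih =>
      simp only [List.foldl_cons]
      rw [pvStep]
      rw [ih (l ++ [q])]
      simp

-- ===== VERDICT (by name: the statement is the Claim_ definition above) =====
theorem bitstring_sans_ancilla_func_spec : Claim_equal_bitstring_sans_ancilla_func := by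
  intro data _
  unfold Spec_bitstring_sans_ancilla_func bitstring_sans_ancilla_func bitstring_sans_ancilla_func_alt
  have h := pvLoop (data.map (fun p => (pvTrunc p.1, p.2))) []
  rw [List.foldl_map] at h
  simp only [List.nil_append] at h
  exact congrArg PySem.Dict.items h
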